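-- pv_equiv track=rewrite | github.com/dvitsios/codesignal-my-solutions | Thumbtack-Bot/thumbtack-bot-task2/solver.py | proCategorization
-- ===== SOURCE A (Python) =====
-- def proCategorization(pros, preferences):
--
--     pref_dict = {}
--     for i in range(len(pros)):
--
--         name = pros[i]
--
--         prefs = preferences[i]
--         for j in range(len(prefs)):
--             p = prefs[j]
--
--             if p not in pref_dict:
--                 pref_dict[p] = [name]
--             else:
--                 pref_dict[p] += [name]
--
--
--     out_list = []
--
--     for k in sorted(pref_dict):
--         tmp = [[k], pref_dict[k]]
--         out_list += [tmp]
--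
--     return out_list
-- ===== SOURCE B (Python) =====
-- def proCategorization(pros, preferences):
--     pairs = [(p, name) for name, prefs in zip(pros, preferences) for p in prefs]
--     keys = sorted(dict.fromkeys(p for p, _ in pairs))
--     return [[[k], [n for p, n in pairs if p == k]] for k in keys]
-- ===== Notes on version B (the rewrite author's own statement) =====
-- stated objective: simpler
-- what changed: A builds a dict of lists incrementally over index loops with a conditional first-insert/append branch and then walks its sorted keys; B flattens input into (preference, name) pairs, takes the sorted order-preserving dedup of the keys, and collects each group with one filter pass per key.
import Mathlib
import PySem

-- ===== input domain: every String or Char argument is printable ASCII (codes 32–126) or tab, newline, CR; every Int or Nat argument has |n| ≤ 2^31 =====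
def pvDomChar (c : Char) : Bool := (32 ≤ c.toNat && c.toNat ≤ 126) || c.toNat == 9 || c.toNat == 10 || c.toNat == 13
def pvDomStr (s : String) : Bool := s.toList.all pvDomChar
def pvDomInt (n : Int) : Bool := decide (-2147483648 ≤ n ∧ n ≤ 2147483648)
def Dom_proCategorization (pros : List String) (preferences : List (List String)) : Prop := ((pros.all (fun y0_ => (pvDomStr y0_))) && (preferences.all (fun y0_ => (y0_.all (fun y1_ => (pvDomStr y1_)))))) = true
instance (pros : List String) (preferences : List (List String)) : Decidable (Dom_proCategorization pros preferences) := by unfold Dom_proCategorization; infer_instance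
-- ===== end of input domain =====

-- B replaces A's incremental dict-of-lists grouping by: flatten to (preference, name) pairs,
-- sort the ordered-deduped keys, and collect each group with one filter pass per key (objective: simpler).

-- ===== PORT A =====
-- literal transliteration of A; the pyGetD defaults "" / [] are never reached inside Pre_
-- (i ranges over range(len(pros)) and Pre_ gives len(pros) ≤ len(preferences)), and
-- pref_dict[k] in the output loop is read with getD since k ∈ keys there.
def proCategorization (pros : List String) (preferences : List (List String)) : List (List (List String)) :=
  let pref_dict : PySem.Dict String (List String) :=
    (PySem.List.pyRange 0 (pros.length : Int) 1).foldl (fun d i =>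
      let name := PySem.List.pyGetD pros i ""
      let prefs := PySem.List.pyGetD preferences i []
      (PySem.List.pyRange 0 (prefs.length : Int) 1).foldl (fun d j =>
        let p := PySem.List.pyGetD prefs j ""
        if d.contains p = false then d.insert p [name]
        else d.insert p (d.getD p [] ++ [name])) d) PySem.Dict.empty
  (PySem.List.sorted pref_dict.keys (fun k => k) false).foldl
    (fun out_list k => out_list ++ [[[k], pref_dict.getD k []]]) []

-- ===== PORT B =====
def proCategorization_alt (pros : List String) (preferences : List (List String)) : List (List (List String)) :=
  let pairs := (pros.zip preferences).flatMap (fun q => q.2.map (fun p => (p, q.1)))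
  let keys := PySem.List.sorted (PySem.List.dedup (pairs.map (fun q => q.1))) (fun k => k) false
  keys.map (fun k => [[k], (pairs.filter (fun q => q.1 == k)).map (fun q => q.2)])

-- ===== PRECONDITION & SPEC =====
-- Pre_ excludes only the inputs where A raises IndexError (preferences shorter than pros).
def Pre_proCategorization (pros : List String) (preferences : List (List String)) : Prop :=
  pros.length ≤ preferences.length
instance (pros : List String) (preferences : List (List String)) : Decidable (Pre_proCategorization pros preferences) := by unfold Pre_proCategorization; infer_instance

def pvWitness_proCategorization : List String × List (List String) :=
  (["ann", "bob"], [["p", "q"], ["p"]])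

def Spec_proCategorization (pros : List String) (preferences : List (List String)) (out : List (List (List String))) : Prop := out = proCategorization_alt pros preferences
instance (pros : List String) (preferences : List (List String)) (out : List (List (List String))) : Decidable (Spec_proCategorization pros preferences out) := by unfold Spec_proCategorization; infer_instance

-- ===== CLAIM (what is proved, stated in full; the proofs are below) =====
def Claim_equal_proCategorization : Prop := ∀ (pros : List String) (preferences : List (List String)), Dom_proCategorization pros preferences → Pre_proCategorization pros preferences → Spec_proCategorization pros preferences (proCategorization pros preferences)


-- ===== LEMMAS AND PROOFS =====

-- A's conditional insert is exactly dict.modify p [] (· ++ [name])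
lemma stepA_eq_modify (d : PySem.Dict String (List String)) (p name : String) :
    (if d.contains p = false then d.insert p [name]
     else d.insert p (d.getD p [] ++ [name])) = d.modify p [] (fun v => v ++ [name]) := by
  simp only [PySem.Dict.modify]
  by_cases h : d.contains p = true
  · simp [h]
  · simp only [Bool.not_eq_true] at h
    rw [PySem.Dict.getD_of_not_contains (h := h)]
    simp [h]

-- A's inner loop over range(len(prefs)) is a modify-fold over prefs
lemma innerA_eq (prefs : List String) (name : String) (d : PySem.Dict String (List String)) :
    (PySem.List.pyRange 0 (prefs.length : Int) 1).foldl (fun d j =>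
        let p := PySem.List.pyGetD prefs j ""
        if d.contains p = false then d.insert p [name]
        else d.insert p (d.getD p [] ++ [name])) d
    = prefs.foldl (fun d p => d.modify p [] (fun v => v ++ [name])) d := by
  rw [← PySem.List.foldl_pyRange_zero_pyGetD' prefs "" (fun d p => d.modify p [] (fun v => v ++ [name])) d]
  apply PySem.List.foldl_congr_mem
  intro acc j _
  exact stepA_eq_modify acc _ name

-- a fold over range(len(pros)) reading pros[i] and preferences[i] is a fold over their zip
lemma foldl_pyRange_zip {σ : Type} (pros : List String) (prefs : List (List String))
    (h : pros.length ≤ prefs.length) (f : σ → String → List String → σ) (init : σ) :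
    (PySem.List.pyRange 0 (pros.length : Int) 1).foldl
      (fun s i => f s (PySem.List.pyGetD pros i "") (PySem.List.pyGetD prefs i [])) init
    = (pros.zip prefs).foldl (fun s q => f s q.1 q.2) init := by
  have hlen : (pros.zip prefs).length = pros.length := by
    simp [List.length_zip]; omega
  rw [← PySem.List.foldl_pyRange_zero_pyGetD' (pros.zip prefs) ("", []) (fun s q => f s q.1 q.2) init]
  rw [hlen]
  apply PySem.List.foldl_congr_mem
  intro acc i hi
  rw [PySem.List.mem_pyRange_one] at hi
  obtain ⟨h0, hlt⟩ := hi
  have hn : i.toNat < pros.length := by omega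
  rw [PySem.List.pyGetD_of_nonneg _ _ h0, PySem.List.pyGetD_of_nonneg _ _ h0,
      PySem.List.pyGetD_of_nonneg _ _ h0]
  rw [List.getD_eq_getElem _ _ hn, List.getD_eq_getElem _ _ (by omega : i.toNat < prefs.length),
      List.getD_eq_getElem _ _ (by rw [hlen]; exact hn)]
  simp [List.getElem_zip]

-- the dict A builds is the modify-fold over B's flattened pair list
lemma dictA_eq_pairs_fold (pros : List String) (preferences : List (List String))
    (h : pros.length ≤ preferences.length) :
    ((PySem.List.pyRange 0 (pros.length : Int) 1).foldl (fun d i =>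
      let name := PySem.List.pyGetD pros i ""
      let prefs := PySem.List.pyGetD preferences i []
      (PySem.List.pyRange 0 (prefs.length : Int) 1).foldl (fun d j =>
        let p := PySem.List.pyGetD prefs j ""
        if d.contains p = false then d.insert p [name]
        else d.insert p (d.getD p [] ++ [name])) d) PySem.Dict.empty)
    = ((pros.zip preferences).flatMap (fun q => q.2.map (fun p => (p, q.1)))).foldl
        (fun d q => d.modify q.1 [] (fun v => v ++ [q.2])) PySem.Dict.empty := by
  rw [List.foldl_flatMap]
  rw [foldl_pyRange_zip pros preferences h (fun d name prefs =>
      (PySem.List.pyRange 0 (prefs.length : Int) 1).foldl (fun d j =>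
        let p := PySem.List.pyGetD prefs j ""
        if d.contains p = false then d.insert p [name]
        else d.insert p (d.getD p [] ++ [name])) d) PySem.Dict.empty]
  apply PySem.List.foldl_congr_mem
  intro acc q _
  rw [innerA_eq q.2 q.1 acc, List.foldl_map]


-- grouped output of the pair-fold dict = sorted-deduped keys with one filter pass per key
lemma outA_eq (pairs : List (String × String)) :
    List.map
      (fun k => [[k], (List.foldl (fun d q => d.modify q.1 [] fun v => v ++ [q.2]) PySem.Dict.empty pairs).getD k []])
      (PySem.List.sorted (List.foldl (fun d q => d.modify q.1 [] fun v => v ++ [q.2]) PySem.Dict.empty pairs).keys (fun k => k)) =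
    (PySem.List.sorted (PySem.List.dedup (List.map (fun q => q.1) pairs)) (fun k => k)).map
      (fun k => [[k], List.map (fun q => q.2) (List.filter (fun q => q.1 == k) pairs)]) := by
  simp only [PySem.Dict.keys_foldl_modify_key pairs (fun q => q.1) [] (fun _ q v => v ++ [q.2]),
    PySem.Dict.keys_empty, PySem.List.dedup_eq_ofList]
  apply List.map_congr_left
  intro k _
  rw [PySem.Dict.getD_foldl_modify_append, PySem.Dict.getD_empty, List.nil_append]


-- ===== VERDICT (by name: the statement is the Claim_ definition above) =====
theorem proCategorization_spec : Claim_equal_proCategorization := by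
  intro pros preferences _ hpre
  unfold Spec_proCategorization proCategorization proCategorization_alt
  rw [dictA_eq_pairs_fold pros preferences hpre]
  rw [PySem.List.foldl_append_singleton_eq_map, List.nil_append]
  exact outA_eq _
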